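-- pv_equiv track=rewrite | github.com/posl/comment_recommendation | script/split_gen/3_time/zh/162_D/1.py | findNumOfTriplet
-- ===== SOURCE A (Python) =====
-- def findNumOfTriplet(s):
--     N = len(s)
--     ans = 0
--     for i in range(N):
--         for j in range(i+1,N):
--             for k in range(j+1,N):
--                 if s[i] != s[j] and s[i] != s[k] and s[j] != s[k] and j - i != k - j:
--                     ans += 1
--     return ans
-- ===== SOURCE B (Python) =====
-- def findNumOfTriplet(s):
--     # O(N^2): for each pair (i, j), count valid k via suffix value-counts
--     # (total counts minus prefix counts) instead of scanning k.
--     N = len(s)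
--     tot = {}
--     for x in s:
--         tot[x] = tot.get(x, 0) + 1
--     pre = {}
--     ans = 0
--     for j in range(N):
--         b = s[j]
--         pre[b] = pre.get(b, 0) + 1  # pre = counts of s[:j+1]
--         L = N - 1 - j
--         for i in range(j):
--             a = s[i]
--             if a != b:
--                 c = L - (tot.get(a, 0) - pre.get(a, 0)) - (tot.get(b, 0) - pre.get(b, 0))
--                 m = 2 * j - i
--                 if m < N and s[m] != a and s[m] != b:
--                     c -= 1
--                 ans += c
--     return ans
-- ===== Notes on version B (the rewrite author's own statement) =====
-- stated objective: faster
-- what changed: A scans all O(N^3) index triples; B loops only over pairs (i, j) and computes the number of valid third indices k in O(1) from total and prefix value counts maintained in dicts, subtracting the single arithmetic-progression index 2j-i when it qualifies.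
import Mathlib
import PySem

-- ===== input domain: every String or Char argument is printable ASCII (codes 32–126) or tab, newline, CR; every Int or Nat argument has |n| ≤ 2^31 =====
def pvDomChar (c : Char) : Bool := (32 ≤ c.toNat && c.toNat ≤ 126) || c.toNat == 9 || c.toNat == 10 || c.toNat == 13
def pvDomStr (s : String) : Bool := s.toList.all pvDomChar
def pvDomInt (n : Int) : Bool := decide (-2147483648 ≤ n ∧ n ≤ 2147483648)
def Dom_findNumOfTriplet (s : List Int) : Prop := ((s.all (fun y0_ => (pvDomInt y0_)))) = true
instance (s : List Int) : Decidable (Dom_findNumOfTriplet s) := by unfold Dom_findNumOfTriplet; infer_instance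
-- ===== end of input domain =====

-- B replaces A's cubic triple loop by a quadratic pair loop: the scan over the third
-- index k is replaced by arithmetic on total/prefix value counts kept in dicts.

-- ===== PORT A =====
def findNumOfTriplet (s : List Int) : Int :=
  let N : Int := s.length
  (PySem.List.pyRange 0 N).foldl (fun ans i =>
    (PySem.List.pyRange (i+1) N).foldl (fun ans j =>
      (PySem.List.pyRange (j+1) N).foldl (fun ans k =>
        if PySem.List.pyGetD s i 0 ≠ PySem.List.pyGetD s j 0 ∧
           PySem.List.pyGetD s i 0 ≠ PySem.List.pyGetD s k 0 ∧
           PySem.List.pyGetD s j 0 ≠ PySem.List.pyGetD s k 0 ∧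
           j - i ≠ k - j then ans + 1 else ans) ans) ans) 0

-- ===== PORT B =====
def findNumOfTriplet_alt (s : List Int) : Int :=
  let N : Int := s.length
  let tot : PySem.Dict Int Int := s.foldl (fun d x => d.insert x (d.getD x 0 + 1)) PySem.Dict.empty
  let st := (PySem.List.pyRange 0 N).foldl (fun (st : Int × PySem.Dict Int Int) j =>
    let b := PySem.List.pyGetD s j 0
    let pre := st.2.insert b (st.2.getD b 0 + 1)
    let L := N - 1 - j
    let ans := (PySem.List.pyRange 0 j).foldl (fun ans i =>
      let a := PySem.List.pyGetD s i 0
      if a ≠ b then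
        let c := L - (tot.getD a 0 - pre.getD a 0) - (tot.getD b 0 - pre.getD b 0)
        let m := 2 * j - i
        let c := if m < N ∧ PySem.List.pyGetD s m 0 ≠ a ∧ PySem.List.pyGetD s m 0 ≠ b then c - 1 else c
        ans + c
      else ans) st.1
    (ans, pre)) ((0 : Int), (PySem.Dict.empty : PySem.Dict Int Int))
  st.1

-- ===== PRECONDITION & SPEC =====
def Spec_findNumOfTriplet (s : List Int) (out : Int) : Prop := out = findNumOfTriplet_alt s
instance (s : List Int) (out : Int) : Decidable (Spec_findNumOfTriplet s out) := by unfold Spec_findNumOfTriplet; infer_instance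

-- ===== CLAIM (what is proved, stated in full; the proofs are below) =====
def Claim_equal_findNumOfTriplet : Prop := ∀ (s : List Int), Dom_findNumOfTriplet s → Spec_findNumOfTriplet s (findNumOfTriplet s)

-- ===== LEMMAS AND PROOFS =====

-- element at index k (both ports only index in range, so the default is never read)
def pvEl (s : List Int) (k : Nat) : Int := s.getD k 0

-- A's innermost indicator, as a function of the three Nat indices
def pvIndA (s : List Int) (i j k : Nat) : Int :=
  if pvEl s i ≠ pvEl s j ∧ pvEl s i ≠ pvEl s k ∧ pvEl s j ≠ pvEl s k ∧
     (j:Int) - i ≠ (k:Int) - j then 1 else 0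

-- B's contribution of the pair (i, j), in count-based form
def pvG (s : List Int) (i j : Nat) : Int :=
  if pvEl s i ≠ pvEl s j then
    ((s.length : Int) - 1 - j
      - ((s.count (pvEl s i) : Int) - ((s.take (j+1)).count (pvEl s i) : Int))
      - ((s.count (pvEl s j) : Int) - ((s.take (j+1)).count (pvEl s j) : Int))
      - (if 2*j - i < s.length ∧ pvEl s (2*j-i) ≠ pvEl s i ∧ pvEl s (2*j-i) ≠ pvEl s j
         then 1 else 0))
  else 0

-- the counter dict built by B's insert/get pattern
def pvCnt (l : List Int) : PySem.Dict Int Int :=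
  l.foldl (fun d x => d.insert x (d.getD x 0 + 1)) PySem.Dict.empty

def pvBody (s : List Int) (st : Int × PySem.Dict Int Int) (j : Int) : Int × PySem.Dict Int Int :=
  let b := PySem.List.pyGetD s j 0
  let pre := st.2.insert b (st.2.getD b 0 + 1)
  let L := (s.length : Int) - 1 - j
  let ans := (PySem.List.pyRange 0 j).foldl (fun ans i =>
    let a := PySem.List.pyGetD s i 0
    if a ≠ b then
      let c := L - ((pvCnt s).getD a 0 - pre.getD a 0) - ((pvCnt s).getD b 0 - pre.getD b 0)
      let m := 2 * j - i
      let c := if m < (s.length : Int) ∧ PySem.List.pyGetD s m 0 ≠ a ∧ PySem.List.pyGetD s m 0 ≠ b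
               then c - 1 else c
      ans + c
    else ans) st.1
  (ans, pre)


theorem pv_countP_two (t : List Int) (a b : Int) (hab : a ≠ b) :
    t.countP (fun x => decide (¬ a = x ∧ ¬ b = x)) + t.count a + t.count b = t.length := by
  induction t with
  | nil => simp
  | cons x t ih =>
    simp only [List.countP_cons, List.count_cons, List.length_cons, beq_iff_eq,
      decide_eq_true_eq]
    split_ifs <;> omega

theorem pv_sum_aux (t : List Int) (P : Int → Prop) [DecidablePred P] :
    (∑ d ∈ Finset.range t.length, if P (t.getD d 0) then (1:Int) else 0)
      = (t.countP (fun x => decide (P x)) : Int) := by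
  induction t with
  | nil => simp
  | cons x t ih =>
    rw [List.length_cons, Finset.sum_range_succ']
    simp only [List.getD_cons_succ, List.getD_cons_zero, ih, List.countP_cons]
    by_cases hx : P x <;> simp [hx]

theorem pv_sum_ite_drop (s : List Int) (c : Nat) (P : Int → Prop) [DecidablePred P] :
    (∑ k ∈ Finset.Ico c s.length, if P (pvEl s k) then (1:Int) else 0)
      = ((s.drop c).countP (fun x => decide (P x)) : Int) := by
  simp only [pvEl]
  rw [Finset.sum_Ico_eq_sum_range, ← pv_sum_aux (s.drop c) P, List.length_drop]
  apply Finset.sum_congr rfl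
  intro d _
  congr 1
  simp [List.getD_eq_getElem?_getD, List.getElem?_drop]

theorem pvCnt_getD_aux (l : List Int) (d : PySem.Dict Int Int) (a : Int) :
    (l.foldl (fun d x => d.insert x (d.getD x 0 + 1)) d).getD a 0
      = d.getD a 0 + (l.count a : Int) := by
  induction l generalizing d with
  | nil => simp
  | cons x t ih =>
    simp only [List.foldl_cons, ih, PySem.Dict.getD_insert, List.count_cons, beq_iff_eq]
    by_cases hx : a = x
    · simp [hx]; ring
    · simp [hx, Ne.symm hx]

theorem pvCnt_getD (l : List Int) (a : Int) : (pvCnt l).getD a 0 = (l.count a : Int) := by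
  rw [pvCnt, pvCnt_getD_aux]
  simp [PySem.Dict.getD, PySem.Dict.get?, PySem.Dict.empty]

theorem pvCnt_snoc (l : List Int) (x : Int) :
    pvCnt (l ++ [x]) = (pvCnt l).insert x ((pvCnt l).getD x 0 + 1) := by
  rw [pvCnt, pvCnt, List.foldl_append, List.foldl_cons, List.foldl_nil]

theorem pv_take_snoc (s : List Int) (j : Nat) (hj : j < s.length) :
    s.take (j+1) = s.take j ++ [pvEl s j] := by
  rw [List.take_add_one, pvEl, List.getElem?_eq_getElem hj, List.getD_eq_getElem?_getD,
    List.getElem?_eq_getElem hj]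
  rfl

theorem pv_foldl_pyRange_to_sum (a b : Nat) (body : Int → Int → Int) (F : Nat → Int)
    (h : ∀ (j : Nat) (ans : Int), a ≤ j → j < b → body ans (j : Int) = ans + F j)
    (init : Int) :
    (PySem.List.pyRange (a : Int) (b : Int)).foldl body init
      = init + ∑ j ∈ Finset.Ico a b, F j := by
  induction b with
  | zero =>
    rw [PySem.List.pyRange_one_eq_nil (by exact_mod_cast Nat.zero_le a)]
    simp
  | succ b ih =>
    by_cases hab : a ≤ b
    · rw [show ((b+1 : Nat) : Int) = (b : Int) + 1 by push_cast; ring,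
        PySem.List.pyRange_one_succ_right (by exact_mod_cast hab),
        List.foldl_append]
      rw [ih (fun j ans hj hjb => h j ans hj (Nat.lt_succ_of_lt hjb))]
      simp only [List.foldl_cons, List.foldl_nil]
      rw [h b _ hab (Nat.lt_succ_self b), Finset.sum_Ico_succ_top hab]
      ring
    · rw [PySem.List.pyRange_one_eq_nil
        (by exact_mod_cast Nat.succ_le_of_lt (Nat.lt_of_not_le hab))]
      rw [Finset.Ico_eq_empty (by omega)]
      simp

theorem pvBody_eq (s : List Int) (j0 : Nat) (hlt : j0 < s.length) (ans0 : Int) :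
    pvBody s (ans0, pvCnt (s.take j0)) ((j0 : Nat) : Int)
      = (ans0 + ∑ i ∈ Finset.Ico 0 j0, pvG s i j0, pvCnt (s.take (j0+1))) := by
  have hpre : (pvCnt (s.take j0)).insert (PySem.List.pyGetD s (j0 : Int) 0)
      ((pvCnt (s.take j0)).getD (PySem.List.pyGetD s (j0 : Int) 0) 0 + 1)
      = pvCnt (s.take (j0+1)) := by
    rw [pv_take_snoc s j0 hlt, pvCnt_snoc, PySem.List.pyGetD_natCast]
    rfl
  simp only [pvBody]
  simp only [hpre]
  rw [Prod.mk.injEq]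
  refine ⟨?_, rfl⟩
  rw [show (0:Int) = ((0:Nat):Int) by simp]
  rw [pv_foldl_pyRange_to_sum 0 j0 _ (fun i => pvG s i j0) ?_ ans0]
  intro i ans _ hi
  simp only [PySem.List.pyGetD_natCast, Nat.cast_zero]
  rw [show (2*((j0:Nat):Int) - ((i:Nat):Int)) = ((2*j0 - i : Nat):Int) by omega]
  simp only [PySem.List.pyGetD_natCast, pvCnt_getD, Nat.cast_lt]
  rw [pvG]
  simp only [pvEl]
  split_ifs <;> ring

theorem pvB_loop (s : List Int) (d : Nat) : ∀ (j0 : Nat), s.length - j0 = d → j0 ≤ s.length →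
    ∀ (ans0 : Int),
    (PySem.List.pyRange (j0 : Int) (s.length : Int)).foldl (pvBody s) (ans0, pvCnt (s.take j0))
      = (ans0 + ∑ j ∈ Finset.Ico j0 s.length, ∑ i ∈ Finset.Ico 0 j, pvG s i j,
         pvCnt (s.take s.length)) := by
  induction d with
  | zero =>
    intro j0 hd hj0 ans0
    have hj : j0 = s.length := by omega
    subst hj
    rw [PySem.List.pyRange_one_eq_nil le_rfl]
    simp
  | succ d ih =>
    intro j0 hd hj0 ans0
    have hlt : j0 < s.length := by omega
    rw [PySem.List.pyRange_one_cons (by exact_mod_cast hlt), List.foldl_cons,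
      pvBody_eq s j0 hlt ans0,
      show ((j0 : Int) + 1) = ((j0 + 1 : Nat) : Int) by push_cast; ring,
      ih (j0+1) (by omega) (by omega)]
    rw [Finset.sum_eq_sum_Ico_succ_bot hlt, Prod.mk.injEq]
    exact ⟨by ring, rfl⟩

theorem pv_pointwise (s : List Int) (i j : Nat) (hij : i < j) (hj : j < s.length) :
    (∑ k ∈ Finset.Ico (j+1) s.length, pvIndA s i j k) = pvG s i j := by
  by_cases hab : pvEl s i = pvEl s j
  · rw [pvG, if_neg (fun h => h hab)]
    apply Finset.sum_eq_zero
    intro k _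
    rw [pvIndA, if_neg]
    intro h; exact h.1 hab
  · -- a ≠ b case
    have hm1 : j + 1 ≤ 2*j - i := by omega
    -- step 1+2 combined: pointwise rewrite
    have step : ∀ k ∈ Finset.Ico (j+1) s.length,
        pvIndA s i j k
          = (if (¬ pvEl s i = pvEl s k ∧ ¬ pvEl s j = pvEl s k) then (1:Int) else 0)
            - (if k = 2*j - i then
                 (if (¬ pvEl s i = pvEl s (2*j-i) ∧ ¬ pvEl s j = pvEl s (2*j-i)) then (1:Int) else 0)
               else 0) := by
      intro k hk
      simp only [Finset.mem_Ico] at hk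
      rw [pvIndA,
        if_congr (show (pvEl s i ≠ pvEl s j ∧ pvEl s i ≠ pvEl s k ∧ pvEl s j ≠ pvEl s k ∧
            (j:Int) - i ≠ (k:Int) - j)
          ↔ (¬ pvEl s i = pvEl s k ∧ ¬ pvEl s j = pvEl s k ∧ ¬ k = 2*j - i) from
          ⟨fun ⟨_, h2, h3, h4⟩ => ⟨h2, h3, by omega⟩,
           fun ⟨h2, h3, h4⟩ => ⟨hab, h2, h3, by omega⟩⟩) rfl rfl]
      by_cases hkm : k = 2*j - i
      · subst hkm
        simp
      · simp [hkm]
    rw [Finset.sum_congr rfl step, Finset.sum_sub_distrib, Finset.sum_ite_eq',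
      pv_sum_ite_drop s (j+1) (fun x => ¬ pvEl s i = x ∧ ¬ pvEl s j = x)]
    -- gather counting facts
    have hcnt := pv_countP_two (s.drop (j+1)) (pvEl s i) (pvEl s j) hab
    have hca : (s.take (j+1)).count (pvEl s i) + (s.drop (j+1)).count (pvEl s i)
        = s.count (pvEl s i) := by
      rw [← List.count_append, List.take_append_drop]
    have hcb : (s.take (j+1)).count (pvEl s j) + (s.drop (j+1)).count (pvEl s j)
        = s.count (pvEl s j) := by
      rw [← List.count_append, List.take_append_drop]
    have hlen : (s.drop (j+1)).length = s.length - (j+1) := List.length_drop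
    -- rewrite the correction term to pvG's shape
    have hcorr : (if 2*j - i ∈ Finset.Ico (j+1) s.length then
          (if (¬ pvEl s i = pvEl s (2*j-i) ∧ ¬ pvEl s j = pvEl s (2*j-i)) then (1:Int) else 0)
        else 0)
        = (if 2*j - i < s.length ∧ pvEl s (2*j-i) ≠ pvEl s i ∧ pvEl s (2*j-i) ≠ pvEl s j
           then 1 else 0) := by
      simp only [Finset.mem_Ico]
      by_cases hmn : 2*j - i < s.length
      · rw [if_pos ⟨hm1, hmn⟩,
          if_congr (show (¬ pvEl s i = pvEl s (2*j-i) ∧ ¬ pvEl s j = pvEl s (2*j-i))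
            ↔ (2*j - i < s.length ∧ pvEl s (2*j-i) ≠ pvEl s i ∧ pvEl s (2*j-i) ≠ pvEl s j) from
            ⟨fun ⟨p, q⟩ => ⟨hmn, Ne.symm p, Ne.symm q⟩,
             fun ⟨_, p, q⟩ => ⟨Ne.symm p, Ne.symm q⟩⟩) rfl rfl]
      · rw [if_neg (fun h => hmn h.2), if_neg (fun h => hmn h.1)]
    rw [hcorr, pvG, if_pos hab]
    omega

theorem pvA_closed (s : List Int) :
    findNumOfTriplet s
      = ∑ i ∈ Finset.Ico 0 s.length, ∑ j ∈ Finset.Ico (i+1) s.length,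
          ∑ k ∈ Finset.Ico (j+1) s.length, pvIndA s i j k := by
  show (PySem.List.pyRange 0 (s.length : Int)).foldl _ 0 = _
  rw [show (0:Int) = ((0:Nat):Int) by simp]
  rw [pv_foldl_pyRange_to_sum 0 s.length _
    (fun i => ∑ j ∈ Finset.Ico (i+1) s.length, ∑ k ∈ Finset.Ico (j+1) s.length, pvIndA s i j k)
    ?_ (((0:Nat)):Int)]
  · simp
  · intro i ans _ _
    rw [show ((i:Int) + 1) = ((i+1 : Nat) : Int) by push_cast; ring]
    rw [pv_foldl_pyRange_to_sum (i+1) s.length _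
      (fun j => ∑ k ∈ Finset.Ico (j+1) s.length, pvIndA s i j k) ?_ ans]
    intro j ans hji hjn
    rw [show ((j:Int) + 1) = ((j+1 : Nat) : Int) by push_cast; ring]
    rw [pv_foldl_pyRange_to_sum (j+1) s.length _ (fun k => pvIndA s i j k) ?_ ans]
    intro k ans hkj hkn
    simp only [PySem.List.pyGetD_natCast, Nat.cast_zero]
    rw [pvIndA]
    simp only [pvEl]
    split_ifs <;> ring
theorem pvB_closed (s : List Int) :
    findNumOfTriplet_alt s = ∑ j ∈ Finset.Ico 0 s.length, ∑ i ∈ Finset.Ico 0 j, pvG s i j := by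
  have h := pvB_loop s (s.length) 0 (by omega) (by omega) 0
  calc findNumOfTriplet_alt s
      = ((PySem.List.pyRange ((0:Nat) : Int) (s.length : Int)).foldl (pvBody s)
          ((0:Int), pvCnt (s.take 0))).1 := rfl
    _ = _ := by rw [h]; simp

-- ===== VERDICT (by name: the statement is the Claim_ definition above) =====
theorem findNumOfTriplet_spec : Claim_equal_findNumOfTriplet := by
  intro s _
  unfold Spec_findNumOfTriplet
  rw [pvA_closed, pvB_closed]
  have h1 : ∀ i ∈ Finset.Ico 0 s.length,
      (∑ j ∈ Finset.Ico (i+1) s.length, ∑ k ∈ Finset.Ico (j+1) s.length, pvIndA s i j k)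
        = ∑ j ∈ Finset.Ico i s.length, pvG s i j := by
    intro i hi
    rw [Finset.mem_Ico] at hi
    rw [Finset.sum_eq_sum_Ico_succ_bot hi.2 (fun j => pvG s i j),
      show pvG s i i = 0 by rw [pvG, if_neg (fun h => h rfl)], zero_add]
    exact Finset.sum_congr rfl (fun j hj => by
      rw [Finset.mem_Ico] at hj
      exact pv_pointwise s i j (by omega) hj.2)
  rw [Finset.sum_congr rfl h1, Finset.sum_Ico_Ico_comm 0 s.length (fun i j => pvG s i j)]
  exact Finset.sum_congr rfl (fun j _ => by
    rw [Finset.sum_Ico_succ_top (Nat.zero_le j) (fun i => pvG s i j),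
      show pvG s j j = 0 by rw [pvG, if_neg (fun h => h rfl)], add_zero])
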